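-- pv_equiv track=rewrite | github.com/CLF78/Midnight-Variety-Pack | tools/cw/mangle.py | isolate_func_name
-- ===== SOURCE A (Python) =====
-- TYPE_ENDINGS = [
--     '*',
--     '&',
--     ')',
--     '>',
-- ]
--
-- def renumerate(data: list):
--     for i in range(len(data)-1, -1, -1):
--         yield (i, data[i])
--
-- def isolate_func_name(func: str) -> int:
--
--     # Set up loop
--     funcStart = -1
--     curr_nest_level = 0
--
--     # Iterate through the string in reverse to find the first non-nested split character
--     # Only detect templates since function names cannot contain function pointers
--     for i, c in renumerate(func):
--         if c == '>':
--             curr_nest_level += 1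
--         elif c == '<':
--             curr_nest_level -= 1
--         elif (c in TYPE_ENDINGS or c.isspace()) and curr_nest_level == 0:
--             funcStart = i
--             break
--
--     # Detect mismatched braces
--     if curr_nest_level:
--         raise ValueError('Mismatched braces!')
--
--     # Detect missing return type
--     if funcStart == -1:
--         raise ValueError('Missing return type!')
--
--     # Return index
--     return funcStart + 1
-- ===== SOURCE B (Python) =====
-- def isolate_func_name(func: str) -> int:
--     # Forward single scan: prefix balance equals total balance exactly where A's
--     # reverse-scan suffix balance is zero; keep the LAST such split point.
--     total = func.count('>') - func.count('<')
--     best = -1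
--     bal = 0
--     for i, c in enumerate(func):
--         if c == '>':
--             bal += 1
--         elif c == '<':
--             bal -= 1
--         elif (c in '*&)' or c.isspace()) and bal == total:
--             best = i
--     if best != -1:
--         return best + 1
--     if total:
--         raise ValueError('Mismatched braces!')
--     raise ValueError('Missing return type!')
-- ===== Notes on version B (the rewrite author's own statement) =====
-- stated objective: alternative
-- what changed: Replaces A's reverse scan that breaks at the first valid split character by a forward single scan that precomputes the total template-bracket balance and keeps the last split point whose running prefix balance equals it.
import Mathlib
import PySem

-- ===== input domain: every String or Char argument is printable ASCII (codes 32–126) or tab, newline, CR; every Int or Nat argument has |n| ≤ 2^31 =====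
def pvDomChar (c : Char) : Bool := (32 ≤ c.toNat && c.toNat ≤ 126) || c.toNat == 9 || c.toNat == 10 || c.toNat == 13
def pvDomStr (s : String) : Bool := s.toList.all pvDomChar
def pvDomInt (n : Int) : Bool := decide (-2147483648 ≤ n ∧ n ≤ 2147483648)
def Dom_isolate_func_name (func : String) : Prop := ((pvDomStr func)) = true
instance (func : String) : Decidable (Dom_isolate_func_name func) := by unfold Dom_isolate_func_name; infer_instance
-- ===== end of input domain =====

-- B replaces A's reverse scan by a forward single scan comparing the running prefix
-- balance against the precomputed total template-bracket balance (same return value; alternative decomposition).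

-- ===== PORT A =====
def TYPE_ENDINGS : List Char := ['*', '&', ')', '>']

-- renumerate(func) = reversed enumeration of the characters
def pvEz (k : Nat) : List Char → List (Nat × Char)
  | [] => []
  | c :: t => (k, c) :: pvEz (k + 1) t

-- A's loop: returns (funcStart, curr_nest_level)
def pvALoop : List (Nat × Char) → Int → Int × Int
  | [], nest => (-1, nest)
  | (i, c) :: rest, nest =>
    if c = '>' then pvALoop rest (nest + 1)
    else if c = '<' then pvALoop rest (nest - 1)
    else if (TYPE_ENDINGS.contains c || PySem.Chars.isspace c) && nest == 0 then ((i : Int), nest)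
    else pvALoop rest nest

-- A raises a ValueError when no split point is found; those inputs are outside Pre_.
def isolate_func_name (func : String) : Int :=
  (pvALoop (pvEz 0 func.toList).reverse 0).1 + 1

-- ===== PORT B =====
-- total template-bracket balance of the string (closers minus openers)
def pvBal (l : List Char) : Int := (l.count '>' : Int) - (l.count '<' : Int)

-- B's forward loop over enumerate(func): state = (index, total, bal, best)
def pvBLoop : List Char → Int → Int → Int → Int → Int
  | [], _, _, _, best => best
  | c :: t, i, total, bal, best =>
    if c = '>' then pvBLoop t (i + 1) total (bal + 1) best
    else if c = '<' then pvBLoop t (i + 1) total (bal - 1) best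
    else if (['*', '&', ')'].contains c || PySem.Chars.isspace c) && bal == total then
      pvBLoop t (i + 1) total bal i
    else pvBLoop t (i + 1) total bal best

-- B raises exactly where A raises (best = -1); those inputs are outside Pre_.
def isolate_func_name_alt (func : String) : Int :=
  pvBLoop func.toList 0 (pvBal func.toList) 0 (-1) + 1

-- ===== PRECONDITION & SPEC =====
-- a character at which A's reverse scan can break
def pvSplitChar (c : Char) : Bool :=
  c ≠ '>' && (TYPE_ENDINGS.contains c || PySem.Chars.isspace c)

-- Pre_ = exactly the inputs on which A returns (no ValueError): some split character
-- with a template-balanced suffix exists.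
def Pre_isolate_func_name (func : String) : Prop :=
  ∃ j < func.toList.length,
    pvSplitChar (func.toList.getD j ' ') = true ∧ pvBal (func.toList.drop (j + 1)) = 0
instance (func : String) : Decidable (Pre_isolate_func_name func) := by
  unfold Pre_isolate_func_name; infer_instance

def pvWitness_isolate_func_name : String := "int f"

def Spec_isolate_func_name (func : String) (out : Int) : Prop := out = isolate_func_name_alt func
instance (func : String) (out : Int) : Decidable (Spec_isolate_func_name func out) := by
  unfold Spec_isolate_func_name; infer_instance

-- ===== CLAIM (what is proved, stated in full; the proofs are below) =====
def Claim_equal_isolate_func_name : Prop := ∀ (func : String), Dom_isolate_func_name func → Pre_isolate_func_name func → Spec_isolate_func_name func (isolate_func_name func)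

-- ===== LEMMAS AND PROOFS =====

def pvContrib (c : Char) : Int := if c = '>' then 1 else if c = '<' then -1 else 0

-- rightmost index j in l with pvSplitChar l[j] and n + (balance of the suffix after j) = 0
def pvCand (n : Int) : List Char → Option Nat
  | [] => none
  | c :: t =>
    if c = '>' ∨ c = '<' then (pvCand n t).map (· + 1)
    else if pvSplitChar c = true ∧ n + pvBal t = 0 then
      some (((pvCand n t).map (· + 1)).getD 0)
    else (pvCand n t).map (· + 1)

theorem pvBal_cons (c : Char) (t : List Char) : pvBal (c :: t) = pvContrib c + pvBal t := by
  simp [pvBal, pvContrib, List.count_cons]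
  split_ifs <;> simp_all <;> push_cast <;> ring

theorem pvBal_append (t : List Char) (c : Char) :
    pvBal (t ++ [c]) = pvBal t + pvContrib c := by
  simp [pvBal, pvContrib, List.count_append, List.count_singleton]
  split_ifs <;> simp_all <;> push_cast <;> ring

theorem pvEz_append (t : List Char) (c : Char) (k : Nat) :
    pvEz k (t ++ [c]) = pvEz k t ++ [(k + t.length, c)] := by
  induction t generalizing k with
  | nil => simp [pvEz]
  | cons d t' ih => simp [pvEz, ih]; omega

theorem pvCand_append (n : Int) (t : List Char) (c : Char) :
    pvCand n (t ++ [c]) =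
      if c = '>' then pvCand (n + 1) t
      else if c = '<' then pvCand (n - 1) t
      else if pvSplitChar c = true ∧ n = 0 then some t.length
      else pvCand n t := by
  induction t generalizing n with
  | nil =>
    simp only [List.nil_append, pvCand, pvBal, List.count_nil]
    by_cases h1 : c = '>' <;> by_cases h2 : c = '<' <;>
      simp [pvCand, h1, h2] <;> split_ifs <;> simp_all [pvCand]
  | cons d t' ih =>
    simp only [List.cons_append, pvCand, pvBal_append, ih]
    by_cases h1 : c = '>' <;> by_cases h2 : c = '<' <;>
      by_cases h3 : d = '>' <;> by_cases h4 : d = '<' <;>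
      by_cases h5 : pvSplitChar c = true ∧ n = 0 <;>
      simp_all [pvCand, pvContrib, pvSplitChar] <;>
      (try omega) <;>
      split_ifs <;> (try simp_all) <;> omega

theorem pvMatchCongr {A : Type} (o : Option Nat) (f : Nat → A) (a b : A) (h : a = b) :
    (match o with | some j => f j | none => a) = (match o with | some j => f j | none => b) := by
  cases o <;> simp [h]

theorem pvALoop_spec (l : List Char) (k : Nat) (n : Int) :
    pvALoop ((pvEz k l).reverse) n =
      match pvCand n l with
      | some j => (((k + j : Nat) : Int), 0)
      | none => (-1, n + pvBal l) := by
  induction l using List.reverseRecOn generalizing k n with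
  | nil => simp [pvEz, pvALoop, pvCand, pvBal]
  | append_singleton t c ih =>
    rw [pvEz_append, pvCand_append, pvBal_append]
    simp only [List.reverse_append, List.reverse_singleton, List.singleton_append, pvALoop]
    by_cases h1 : c = '>'
    · simp only [if_pos h1, ih]
      exact pvMatchCongr _ _ _ _ (by simp [pvContrib, h1, Prod.mk.injEq] <;> omega)
    · by_cases h2 : c = '<'
      · simp only [if_neg h1, if_pos h2, ih]
        exact pvMatchCongr _ _ _ _ (by simp [pvContrib, h1, h2, Prod.mk.injEq] <;> omega)
      · by_cases h3 : (TYPE_ENDINGS.contains c || PySem.Chars.isspace c) = true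
        · by_cases h4 : n = 0
          · have hp : ((TYPE_ENDINGS.contains c || PySem.Chars.isspace c) && n == 0) = true := by
              rw [Bool.and_eq_true]; exact ⟨h3, by simp [h4]⟩
            have hq : pvSplitChar c = true ∧ n = 0 := by
              refine ⟨?_, h4⟩
              simp only [pvSplitChar, Bool.and_eq_true, decide_eq_true_eq, ne_eq]
              refine ⟨h1, ?_⟩
              simpa using h3
            simp only [if_neg h1, if_neg h2, hp, if_pos hq, if_true]
            simp [h4]
          · have hp : ((TYPE_ENDINGS.contains c || PySem.Chars.isspace c) && n == 0) = false := by
              simp [h4]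
            have hq : ¬ (pvSplitChar c = true ∧ n = 0) := fun h => h4 h.2
            simp only [if_neg h1, if_neg h2, hp, if_neg hq, Bool.false_eq_true, if_false, ih]
            exact pvMatchCongr _ _ _ _ (by simp [pvContrib, h1, h2, Prod.mk.injEq] <;> omega)
        · have hp : ((TYPE_ENDINGS.contains c || PySem.Chars.isspace c) && n == 0) = false := by
            simp only [Bool.and_eq_false_iff]; left; simpa using h3
          have hq : ¬ (pvSplitChar c = true ∧ n = 0) := by
            intro h; have h' := h.1
            simp only [pvSplitChar, Bool.and_eq_true, decide_eq_true_eq, ne_eq] at h'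
            exact h3 h'.2
          simp only [if_neg h1, if_neg h2, hp, if_neg hq, Bool.false_eq_true, if_false, ih]
          exact pvMatchCongr _ _ _ _ (by simp [pvContrib, h1, h2, Prod.mk.injEq] <;> omega)

theorem pvBLoop_spec (l : List Char) (i bal best : Int) :
    pvBLoop l i (bal + pvBal l) bal best =
      match pvCand 0 l with
      | some j => i + j
      | none => best := by
  induction l generalizing i bal best with
  | nil => simp [pvBLoop, pvCand]
  | cons c t ih =>
    rw [pvBal_cons]
    simp only [pvBLoop, pvCand]
    by_cases h1 : c = '>'
    · have he : bal + (pvContrib c + pvBal t) = (bal + 1) + pvBal t := by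
        simp [pvContrib, h1]; ring
      rw [he]
      simp only [if_pos h1, ih, if_pos (by simp [h1] : c = '>' ∨ c = '<')]
      cases h : pvCand 0 t <;> simp [h] <;> ring
    · by_cases h2 : c = '<'
      · have he : bal + (pvContrib c + pvBal t) = (bal - 1) + pvBal t := by
          simp [pvContrib, h1, h2]; ring
        rw [he]
        simp only [if_neg h1, if_pos h2, ih, if_pos (by simp [h2] : c = '>' ∨ c = '<')]
        cases h : pvCand 0 t <;> simp [h] <;> ring
      · have he : bal + (pvContrib c + pvBal t) = bal + pvBal t := by
          simp [pvContrib, h1, h2]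
        rw [he]
        have hor : ¬ (c = '>' ∨ c = '<') := by simp [h1, h2]
        by_cases h3 : (['*', '&', ')'].contains c || PySem.Chars.isspace c) = true
        · have hsp : pvSplitChar c = true := by
            simp [pvSplitChar, h1, TYPE_ENDINGS]
            simp at h3
            tauto
          by_cases h4 : pvBal t = 0
          · have hp : ((['*', '&', ')'].contains c || PySem.Chars.isspace c) && bal == bal + pvBal t) = true := by
              rw [Bool.and_eq_true]; exact ⟨h3, by simp [h4]⟩
            have hq : pvSplitChar c = true ∧ (0 : Int) + pvBal t = 0 := ⟨hsp, by omega⟩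
            simp only [if_neg h1, if_neg h2, hp, if_true, ih, if_neg hor, if_pos hq]
            cases h : pvCand 0 t <;> simp [h] <;> ring
          · have hp : ((['*', '&', ')'].contains c || PySem.Chars.isspace c) && bal == bal + pvBal t) = false := by
              have : (bal == bal + pvBal t) = false := by simp; omega
              simp [this]
            have hq : ¬ (pvSplitChar c = true ∧ (0 : Int) + pvBal t = 0) := by
              intro h; apply h4; omega
            simp only [if_neg h1, if_neg h2, hp, Bool.false_eq_true, if_false, ih, if_neg hor, if_neg hq]
            cases h : pvCand 0 t <;> simp [h] <;> ring
        · have hp : ((['*', '&', ')'].contains c || PySem.Chars.isspace c) && bal == bal + pvBal t) = false := by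
            simp only [Bool.and_eq_false_iff]; left; simpa using h3
          have hq : ¬ (pvSplitChar c = true ∧ (0 : Int) + pvBal t = 0) := by
            intro hh
            have h' := hh.1
            simp only [pvSplitChar, Bool.and_eq_true, decide_eq_true_eq, ne_eq] at h'
            apply absurd _ h3
            have hm := h'.2
            simp [TYPE_ENDINGS] at hm
            rcases hm with (h | h | h | h) | h
            · simp [h]
            · simp [h]
            · simp [h]
            · exact absurd h h'.1
            · simp [h]
          simp only [if_neg h1, if_neg h2, hp, Bool.false_eq_true, if_false, ih, if_neg hor, if_neg hq]
          cases h : pvCand 0 t <;> simp [h] <;> ring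

-- ===== VERDICT (by name: the statement is the Claim_ definition above) =====
theorem isolate_func_name_spec : Claim_equal_isolate_func_name := by
  intro func _ _
  unfold Spec_isolate_func_name isolate_func_name isolate_func_name_alt
  have hb := pvBLoop_spec func.toList 0 0 (-1)
  rw [zero_add] at hb
  rw [hb, pvALoop_spec func.toList 0 0]
  cases h : pvCand 0 func.toList <;> simp [h]
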